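-- pv_equiv track=rewrite | github.com/KhelKim/codingpractice2 | programmers/level2/stock_price.py | solution
-- ===== SOURCE A (Python) =====
-- def solution(prices):
--     result = [len(prices) - 1 - i for i in range(len(prices))]
--     stack = []
--     for idx, price in enumerate(prices):
--         if not stack:
--             stack.append((idx, price))
--         else:
--             while stack:
--                 last_idx, last_price = stack[-1]
--                 if price < last_price:
--                     result[last_idx] = idx - last_idx
--                     stack.pop()
--                 else:
--                     break
--             stack.append((idx, price))
--     return result
-- ===== SOURCE B (Python) =====
-- def solution(prices):
--     n = len(prices)
--     result = []
--     for i in range(n):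
--         count = 0
--         for q in prices[i + 1:]:
--             count += 1
--             if q < prices[i]:
--                 break
--         result.append(count)
--     return result
-- ===== Notes on version B (the rewrite author's own statement) =====
-- stated objective: simpler
-- what changed: Replaced the monotonic-stack single pass (precomputed result array patched on pops) with a plain per-index forward scan that counts seconds until the first strict drop.
import Mathlib
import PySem

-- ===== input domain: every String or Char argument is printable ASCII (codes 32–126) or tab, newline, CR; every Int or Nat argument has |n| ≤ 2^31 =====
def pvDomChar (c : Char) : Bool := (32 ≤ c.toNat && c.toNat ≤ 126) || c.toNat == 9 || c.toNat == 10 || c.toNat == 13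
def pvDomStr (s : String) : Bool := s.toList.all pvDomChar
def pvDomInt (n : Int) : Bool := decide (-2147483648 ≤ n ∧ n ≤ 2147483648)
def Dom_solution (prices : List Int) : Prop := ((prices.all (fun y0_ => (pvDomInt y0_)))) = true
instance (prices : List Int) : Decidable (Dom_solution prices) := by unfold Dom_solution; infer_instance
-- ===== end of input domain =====

-- B replaces A's monotonic-stack single pass by a plain quadratic forward scan per index (simpler, not faster).

-- ===== PORT A =====
-- The Python stack is stored top-first (head = Python's stack[-1]; append = cons).
-- the inner `while stack:` loop: pop while price < top's price, updating result
def popA (idx : Nat) (price : Int) : List (Nat × Int) → List Int → (List Int × List (Nat × Int))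
  | [], r => (r, [])
  | (li, lp) :: rest, r =>
    if price < lp then popA idx price rest (r.set li ((idx : Int) - (li : Int)))
    else (r, (li, lp) :: rest)

-- one iteration of `for idx, price in enumerate(prices)`
def stepA (st : List Int × List (Nat × Int)) (e : Nat × Int) : List Int × List (Nat × Int) :=
  if st.2.isEmpty then (st.1, e :: st.2)
  else
    let rs := popA e.1 e.2 st.2 st.1
    (rs.1, e :: rs.2)

-- `enumerate(prices)`
def enumA : List Int → Nat → List (Nat × Int)
  | [], _ => []
  | a :: t, k => (k, a) :: enumA t (k + 1)

def solution (prices : List Int) : List Int :=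
  ((enumA prices 0).foldl stepA
    ((List.range prices.length).map (fun (i : Nat) => (prices.length : Int) - 1 - (i : Int)), [])).1

-- ===== PORT B =====
-- inner loop: count seconds until the first strict drop (break), else the whole suffix
def countB (p : Int) : List Int → Int
  | [] => 0
  | q :: t => if q < p then 1 else 1 + countB p t

def solution_alt (prices : List Int) : List Int :=
  (List.range prices.length).map (fun i => countB (prices.getD i 0) (prices.drop (i + 1)))

-- ===== PRECONDITION & SPEC =====
def Spec_solution (prices : List Int) (out : List Int) : Prop := out = solution_alt prices
instance (prices : List Int) (out : List Int) : Decidable (Spec_solution prices out) := by unfold Spec_solution; infer_instance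

-- ===== CLAIM (what is proved, stated in full; the proofs are below) =====
def Claim_equal_solution : Prop := ∀ (prices : List Int), Dom_solution prices → Spec_solution prices (solution prices)

-- ===== LEMMAS AND PROOFS =====

-- i is "alive" after the first k elements: no strict drop strictly between i and k
def aliveB (P : List Int) (k i : Nat) : Bool :=
  decide (∀ j, j < k → i < j → ¬ P.getD j 0 < P.getD i 0)

-- canonical stack after processing the first k elements (top first)
def stackOf (P : List Int) (k : Nat) : List (Nat × Int) :=
  (((List.range k).filter (aliveB P k)).reverse).map (fun i => (i, P.getD i 0))

-- canonical result entry after processing the first k elements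
def resVal (P : List Int) (k i : Nat) : Int :=
  match ((P.take k).drop (i + 1)).findIdx? (fun q => decide (q < P.getD i 0)) with
  | some d => (d : Int) + 1
  | none => (P.length : Int) - 1 - (i : Int)

def resOf (P : List Int) (k : Nat) : List Int := (List.range P.length).map (resVal P k)

lemma dropWhile_eq_filter {α : Type} (p : α → Bool) (l : List α)
    (h : l.Pairwise (fun a b => p b = true → p a = true)) :
    l.dropWhile p = l.filter (fun a => !p a) := by
  induction l with
  | nil => rfl
  | cons a t ih =>
    rcases List.pairwise_cons.mp h with ⟨ha, ht⟩
    by_cases hp : p a = true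
    · simp [List.dropWhile_cons, hp, ih ht]
    · simp only [Bool.not_eq_true] at hp
      have hall : ∀ b ∈ t, p b = false := fun b hb => by
        by_contra hc
        simp only [Bool.not_eq_false] at hc
        have := ha b hb hc; simp [hp] at this
      rw [List.dropWhile_cons_of_neg (by simp [hp]), List.filter_cons_of_pos (by simp [hp]),
        List.filter_eq_self.mpr (fun b hb => by simp [hall b hb])]

lemma takeWhile_eq_filter {α : Type} (p : α → Bool) (l : List α)
    (h : l.Pairwise (fun a b => p b = true → p a = true)) :
    l.takeWhile p = l.filter p := by
  induction l with
  | nil => rfl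
  | cons a t ih =>
    rcases List.pairwise_cons.mp h with ⟨ha, ht⟩
    by_cases hp : p a = true
    · simp [List.takeWhile_cons, hp, ih ht]
    · simp only [Bool.not_eq_true] at hp
      have hall : ∀ b ∈ t, p b = false := fun b hb => by
        by_contra hc
        simp only [Bool.not_eq_false] at hc
        have := ha b hb hc; simp [hp] at this
      rw [List.takeWhile_cons_of_neg (by simp [hp]), List.filter_cons_of_neg (by simp [hp]),
        List.filter_eq_nil_iff.mpr (fun b hb => by simp [hall b hb])]

lemma popA_eq (idx : Nat) (price : Int) : ∀ (s : List (Nat × Int)) (r : List Int),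
    popA idx price s r =
      ((s.takeWhile (fun e => decide (price < e.2))).foldl
          (fun r e => r.set e.1 ((idx : Int) - (e.1 : Int))) r,
        s.dropWhile (fun e => decide (price < e.2))) := by
  intro s
  induction s with
  | nil => intro r; rfl
  | cons e rest ih =>
    intro r
    obtain ⟨li, lp⟩ := e
    by_cases hp : price < lp
    · simp [popA, hp, List.takeWhile_cons, List.dropWhile_cons, ih]
    · simp [popA, hp, List.takeWhile_cons, List.dropWhile_cons]

lemma alive_succ_self (P : List Int) (k : Nat) : aliveB P (k + 1) k = true := by
  simp only [aliveB, decide_eq_true_iff]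
  intro j h1 h2; omega

lemma alive_succ (P : List Int) (k i : Nat) (hik : i < k) :
    aliveB P (k + 1) i = (aliveB P k i && !decide (P.getD k 0 < P.getD i 0)) := by
  rw [Bool.eq_iff_iff]
  simp only [aliveB, Bool.and_eq_true, Bool.not_eq_true', decide_eq_true_iff,
    decide_eq_false_iff_not]
  constructor
  · intro h
    exact ⟨fun j h1 h2 => h j (by omega) h2, h k (by omega) hik⟩
  · rintro ⟨h1, h2⟩ j hj hij
    rcases Nat.lt_succ_iff_lt_or_eq.mp hj with h | rfl
    · exact h1 j h hij
    · exact h2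

lemma alive_pairwise (P : List Int) (k : Nat) (c : Int) :
    (((List.range k).filter (aliveB P k)).reverse).Pairwise
      (fun a b => decide (c < P.getD b 0) = true → decide (c < P.getD a 0) = true) := by
  rw [List.pairwise_reverse]
  have base : ((List.range k).filter (aliveB P k)).Pairwise (· < ·) :=
    (List.pairwise_lt_range).filter _
  refine base.imp_of_mem ?_
  intro a b hma hmb hab
  simp only [List.mem_filter, List.mem_range] at hma hmb
  simp only [decide_eq_true_iff]
  intro hc
  have halive : ∀ j, j < k → a < j → ¬ P.getD j 0 < P.getD a 0 :=
    decide_eq_true_iff.mp hma.2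
  have := halive b hmb.1 hab
  omega

lemma stack_step (P : List Int) (k : Nat) :
    stackOf P (k + 1) =
      (k, P.getD k 0) :: (stackOf P k).dropWhile (fun e => decide (P.getD k 0 < e.2)) := by
  unfold stackOf
  rw [List.dropWhile_map]
  simp only [Function.comp_def]
  rw [dropWhile_eq_filter _ _ (alive_pairwise P k (P.getD k 0))]
  rw [List.range_succ, List.filter_append, List.filter_cons]
  simp only [alive_succ_self, if_pos rfl]
  rw [List.filter_congr (fun i hi => alive_succ P k i (List.mem_range.mp hi)), ← List.filter_filter]
  simp [List.filter_reverse, Bool.and_comm]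

lemma stack_take (P : List Int) (k : Nat) :
    (stackOf P k).takeWhile (fun e => decide (P.getD k 0 < e.2)) =
      (((List.range k).filter (fun i => aliveB P k i && decide (P.getD k 0 < P.getD i 0))).reverse).map
        (fun i => (i, P.getD i 0)) := by
  unfold stackOf
  rw [List.takeWhile_map]
  simp only [Function.comp_def]
  rw [takeWhile_eq_filter _ _ (alive_pairwise P k (P.getD k 0))]
  rw [← List.filter_reverse, List.filter_filter, List.filter_reverse]
  simp [Bool.and_comm]

lemma foldl_set_length (f : Nat × Int → Int) : ∀ (l : List (Nat × Int)) (r : List Int),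
    (l.foldl (fun r e => r.set e.1 (f e)) r).length = r.length := by
  intro l
  induction l with
  | nil => intro r; rfl
  | cons e t ih => intro r; rw [List.foldl_cons, ih, List.length_set]

lemma foldl_set_getD (f : Nat → Int) : ∀ (l : List (Nat × Int)) (r : List Int) (i : Nat),
    (∀ e ∈ l, e.1 < r.length) →
    (l.foldl (fun r e => r.set e.1 (f e.1)) r).getD i 0 =
      if l.any (fun e => e.1 == i) then f i else r.getD i 0 := by
  intro l
  induction l with
  | nil => intro r i _; simp
  | cons e t ih =>
    intro r i hlt
    rw [List.foldl_cons, ih _ i (fun e' he' => by rw [List.length_set]; exact hlt e' (by simp [he']))]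
    by_cases hei : e.1 = i
    · subst hei
      by_cases ht : t.any (fun e' => e'.1 == e.1)
      · simp [ht]
      · simp only [ht, if_false, List.any_cons, beq_self_eq_true, Bool.true_or, if_true]
        have := hlt e (by simp)
        rw [List.getD_eq_getElem?_getD, List.getElem?_set_self (by omega)]
        simp
    · have : ((e :: t).any (fun e' => e'.1 == i)) = (t.any (fun e' => e'.1 == i)) := by
        simp [List.any_cons, hei]
      rw [this]
      by_cases ht : t.any (fun e' => e'.1 == i)
      · simp [ht]
      · simp only [ht, if_false]
        rw [List.getD_eq_getElem?_getD, List.getD_eq_getElem?_getD,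
          List.getElem?_set_ne (by omega)]

lemma resOf_getD (P : List Int) (k i : Nat) (hi : i < P.length) :
    (resOf P k).getD i 0 = resVal P k i := by
  unfold resOf
  rw [List.getD_eq_getElem?_getD, List.getElem?_map, List.getElem?_range hi]
  simp

lemma countB_eq (p : Int) : ∀ (l : List Int),
    countB p l =
      match l.findIdx? (fun q => decide (q < p)) with
      | some d => (d : Int) + 1
      | none => (l.length : Int) := by
  intro l
  induction l with
  | nil => simp [countB]
  | cons q t ih =>
    by_cases hq : q < p
    · simp [countB, hq, List.findIdx?_cons]
    · simp only [countB, if_neg hq, List.findIdx?_cons, decide_eq_true_iff, hq, decide_false,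
        Bool.false_eq_true, if_false, ih]
      cases h : t.findIdx? (fun q => decide (q < p)) with
      | none => simp [h]; push_cast; ring
      | some d => simp [h]; push_cast; ring

lemma resOf_final (P : List Int) : resOf P P.length = solution_alt P := by
  unfold resOf solution_alt
  apply List.map_congr_left
  intro i hi
  rw [List.mem_range] at hi
  rw [countB_eq, resVal, List.take_length]
  cases h : (P.drop (i+1)).findIdx? (fun q => decide (q < P.getD i 0)) with
  | some d => simp
  | none =>
    simp only [List.length_drop]
    rw [Nat.cast_sub (by omega)]
    push_cast; ring

lemma resOf_zero (P : List Int) :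
    resOf P 0 = (List.range P.length).map (fun (i : Nat) => (P.length : Int) - 1 - (i : Int)) := by
  unfold resOf
  apply List.map_congr_left
  intro i hi
  simp [resVal]

lemma alive_iff_none (P : List Int) (k i : Nat) (hk : k ≤ P.length) :
    aliveB P k i = true ↔
      ((P.take k).drop (i + 1)).findIdx? (fun q => decide (q < P.getD i 0)) = none := by
  rw [List.findIdx?_eq_none_iff]
  simp only [aliveB, decide_eq_true_iff]
  constructor
  · intro h x hx
    rw [List.mem_iff_getElem] at hx
    obtain ⟨d, hd, hxe⟩ := hx
    have hd' : i + 1 + d < k := by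
      simp only [List.length_drop, List.length_take] at hd; omega
    rw [List.getElem_drop, List.getElem_take] at hxe
    have h2 := h (i + 1 + d) hd' (by omega)
    rw [List.getD_eq_getElem P 0 (by omega)] at h2
    rw [hxe] at h2
    simpa using h2
  · intro h j hj hij
    have hx : P.getD j 0 ∈ (P.take k).drop (i + 1) := by
      rw [List.mem_iff_getElem]
      refine ⟨j - (i + 1), by simp only [List.length_drop, List.length_take]; omega, ?_⟩
      have harith : i + 1 + (j - (i + 1)) = j := by omega
      rw [List.getElem_drop, List.getElem_take]
      simp only [harith]
      rw [List.getD_eq_getElem P 0 (by omega)]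
    have := h _ hx
    simpa using this

lemma resVal_step (P : List Int) (k i : Nat) (hk : k < P.length) :
    resVal P (k + 1) i =
      if i < k ∧ aliveB P k i = true ∧ P.getD k 0 < P.getD i 0 then (k : Int) - (i : Int)
      else resVal P k i := by
  by_cases hik : i < k
  · have htake : (P.take (k + 1)).drop (i + 1) = (P.take k).drop (i + 1) ++ [P.getD k 0] := by
      rw [List.take_succ, List.getElem?_eq_getElem hk, List.getD_eq_getElem P 0 hk]
      rw [List.drop_append_of_le_length (by simp; omega)]
      rfl
    unfold resVal
    rw [htake, List.findIdx?_append]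
    cases hfi : ((P.take k).drop (i + 1)).findIdx? (fun q => decide (q < P.getD i 0)) with
    | some d =>
      have hnal : ¬ aliveB P k i = true := by
        rw [alive_iff_none P k i (by omega), hfi]; simp
      simp [hnal]
    | none =>
      have hal : aliveB P k i = true := by
        rw [alive_iff_none P k i (by omega)]; exact hfi
      by_cases hlt : P.getD k 0 < P.getD i 0
      · have hlen : ((P.take k).drop (i + 1)).length = k - (i + 1) := by
          simp only [List.length_drop, List.length_take]; omega
        simp [List.findIdx?_cons, hal, hik, hlen]
        simp only [List.getD_eq_getElem?_getD] at hlt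
        rw [if_pos hlt]
        rw [if_pos hlt]
        show ((k - (i + 1) : Nat) : Int) + 1 = (k : Int) - (i : Int)
        omega
      · simp [List.findIdx?_cons]
        simp only [List.getD_eq_getElem?_getD] at hlt
        rw [if_neg hlt]
        simp [hlt]
  · have h1 : (P.take (k + 1)).drop (i + 1) = [] := by
      apply List.drop_eq_nil_of_le
      simp only [List.length_take]; omega
    have h2 : (P.take k).drop (i + 1) = [] := by
      apply List.drop_eq_nil_of_le
      simp only [List.length_take]; omega
    unfold resVal
    rw [h1, h2]
    simp [hik]

lemma res_step (P : List Int) (k : Nat) (hk : k < P.length) :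
    (((stackOf P k).takeWhile (fun e => decide (P.getD k 0 < e.2))).foldl
        (fun r e => r.set e.1 ((k : Int) - (e.1 : Int))) (resOf P k)) = resOf P (k + 1) := by
  rw [stack_take]
  have hlenres : (resOf P k).length = P.length := by simp [resOf]
  apply List.ext_getElem
  · rw [foldl_set_length (fun e => (k : Int) - (e.1 : Int))]
    simp [resOf, hlenres]
  · intro i h1 h2
    have hi : i < P.length := by
      rw [foldl_set_length (fun e => (k : Int) - (e.1 : Int)), hlenres] at h1
      exact h1
    rw [← List.getD_eq_getElem _ 0, ← List.getD_eq_getElem _ 0]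
    rw [foldl_set_getD (fun j => (k : Int) - (j : Int)) _ _ i ?hbound]
    case hbound =>
      intro e he
      simp only [List.mem_map, List.mem_reverse, List.mem_filter, List.mem_range] at he
      obtain ⟨j, ⟨hjk, _⟩, rfl⟩ := he
      rw [hlenres]; omega
    rw [resOf_getD P k i hi, resOf_getD P (k + 1) i hi, resVal_step P k i hk]
    by_cases hc : i < k ∧ aliveB P k i = true ∧ P.getD k 0 < P.getD i 0
    · have : (((List.range k).filter
          (fun j => aliveB P k j && decide (P.getD k 0 < P.getD j 0))).reverse.map
          (fun j => (j, P.getD j 0))).any (fun e => e.1 == i) = true := by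
        simp only [List.any_map, List.any_reverse, List.any_eq_true]
        refine ⟨i, ?_, by simp⟩
        simp only [List.mem_filter, List.mem_range, Bool.and_eq_true, decide_eq_true_iff]
        exact ⟨hc.1, hc.2.1, hc.2.2⟩
      rw [this, if_pos hc]; simp
    · have : (((List.range k).filter
          (fun j => aliveB P k j && decide (P.getD k 0 < P.getD j 0))).reverse.map
          (fun j => (j, P.getD j 0))).any (fun e => e.1 == i) = false := by
        simp only [List.any_map, List.any_reverse]
        rw [List.any_eq_false]
        intro j hj
        simp only [List.mem_filter, List.mem_range, Bool.and_eq_true, decide_eq_true_iff] at hj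
        intro hji
        have : j = i := by simpa using hji
        subst this
        exact hc ⟨hj.1, hj.2.1, hj.2.2⟩
      rw [this, if_neg hc]
      simp

lemma stepA_step (P : List Int) (k : Nat) (hk : k < P.length) :
    stepA (resOf P k, stackOf P k) (k, P.getD k 0) = (resOf P (k + 1), stackOf P (k + 1)) := by
  by_cases h : (stackOf P k).isEmpty
  · have hnil : stackOf P k = [] := by simpa [List.isEmpty_iff] using h
    have hres := res_step P k hk
    rw [hnil] at hres
    simp only [List.takeWhile_nil, List.foldl_nil] at hres
    simp [stepA, hnil, stack_step, ← hres]
  · have hres := res_step P k hk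
    simp only [stepA, h, if_neg, Bool.false_eq_true, if_false]
    rw [popA_eq]
    simp only []
    rw [hres, stack_step]

lemma main_loop (P : List Int) : ∀ (l : List Int) (k : Nat),
    k + l.length = P.length → P.drop k = l →
    (enumA l k).foldl stepA (resOf P k, stackOf P k) = (resOf P P.length, stackOf P P.length) := by
  intro l
  induction l with
  | nil =>
    intro k h1 _
    have : k = P.length := by simpa using h1
    subst this
    rfl
  | cons a t ih =>
    intro k h1 h2
    have hk : k < P.length := by simp at h1; omega
    have ha : P.getD k 0 = a := by
      have : P[k]? = some a := by
        rw [← List.head?_drop, h2]; rfl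
      simp [List.getD_eq_getElem?_getD, this]
    have ht : P.drop (k + 1) = t := by
      rw [← List.tail_drop, h2]; rfl
    simp only [enumA, List.foldl_cons]
    rw [← ha, stepA_step P k hk]
    exact ih (k + 1) (by simp at h1 ⊢; omega) ht

-- ===== VERDICT (by name: the statement is the Claim_ definition above) =====
theorem solution_spec : Claim_equal_solution := by
  intro P _
  show solution P = solution_alt P
  have h := main_loop P P 0 (by simp) (by simp)
  unfold solution
  rw [← resOf_zero P]
  have : stackOf P 0 = [] := by simp [stackOf]
  rw [← this, h, ← resOf_final P]
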